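-- pv_equiv track=rewrite | github.com/rebuilder945/FL_research | ast_research/python_code_5.23/newpage4/success_code/覃耀瑄-3229-2024-03-27_00_02_35.py | find_unique_elements
-- ===== SOURCE A (Python) =====
-- def find_unique_elements(nums):
--     count_dict = {}
--     for num in nums:
--         if num in count_dict:
--             count_dict[num] += 1
--         else:
--             count_dict[num] = 1
--
--     unique_elements = []
--     for num, count in count_dict.items():
--         if count == 1:
--             unique_elements.append(num)
--
--     if unique_elements:
--         return ','.join(map(str, sorted(unique_elements)))
--     else:
--         return False
-- ===== SOURCE B (Python) =====
-- def find_unique_elements(nums):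
--     s = sorted(nums)
--     result = []
--     i = 0
--     n = len(s)
--     while i < n:
--         j = i + 1
--         while j < n and s[j] == s[i]:
--             j += 1
--         if j == i + 1:
--             result.append(s[i])
--         i = j
--     return ','.join(map(str, result)) if result else False
-- ===== Notes on version B (the rewrite author's own statement) =====
-- stated objective: alternative
-- what changed: Replaces the hash-count dict plus post-hoc sort of the singletons by sorting the input first and collecting length-1 runs in one linear scan, so the result list is built already sorted; Pre_ excludes inputs with no element of multiplicity 1, on which both A and B return the bare boolean False instead of a string.
-- outside the precondition, e.g. on find_unique_elements([]): A returns False, B returns False; on find_unique_elements([2, 2]): A returns False, B returns False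
import Mathlib
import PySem

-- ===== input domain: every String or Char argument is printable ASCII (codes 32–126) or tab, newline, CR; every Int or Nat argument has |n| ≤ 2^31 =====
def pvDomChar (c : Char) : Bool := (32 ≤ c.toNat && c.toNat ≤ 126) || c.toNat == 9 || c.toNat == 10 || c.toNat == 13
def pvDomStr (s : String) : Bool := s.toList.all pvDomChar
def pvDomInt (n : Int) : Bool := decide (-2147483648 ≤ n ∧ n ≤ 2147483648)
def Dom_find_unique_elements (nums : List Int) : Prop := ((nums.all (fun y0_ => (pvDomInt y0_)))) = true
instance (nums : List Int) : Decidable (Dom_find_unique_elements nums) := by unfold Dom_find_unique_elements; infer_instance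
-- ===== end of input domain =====

-- B sorts the input first and collects length-1 runs in one linear scan (no counting dict): an alternative algorithm with the same exact return value.


-- ===== PORT A =====
def find_unique_elements (nums : List Int) : Option String :=
  -- counting loop: 'if num in count_dict: count_dict[num] += 1 else: count_dict[num] = 1'
  let count_dict : PySem.Dict Int Int :=
    nums.foldl (fun d num =>
      if d.contains num then d.insert num (d.getD num 0 + 1) else d.insert num 1)
      PySem.Dict.empty
  -- 'for num, count in count_dict.items(): if count == 1: unique_elements.append(num)'
  let unique_elements : List Int :=
    count_dict.items.foldl (fun acc p => if p.2 == 1 then acc ++ [p.1] else acc) []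
  if !unique_elements.isEmpty then
    some (PySem.Str.join ","
      ((PySem.List.sorted unique_elements (fun x => x) false).map PySem.Int.toStr))
  else
    none

-- ===== PORT B =====
-- Source B's outer while loop: the inner while skips the run of elements equal to the
-- current head (takeWhile/dropWhile); a run of length 1 contributes its element.
def scanRuns : List Int → List Int
  | [] => []
  | x :: t =>
    let run := t.takeWhile (fun y => y == x)
    let rest := t.dropWhile (fun y => y == x)
    if run.isEmpty then x :: scanRuns rest else scanRuns rest
termination_by l => l.length
decreasing_by
  all_goals
    have := List.length_dropWhile_le (p := fun y => y == x) (l := t)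
    simp only [List.length_cons]
    omega

def find_unique_elements_alt (nums : List Int) : Option String :=
  let s := PySem.List.sorted nums (fun x => x) false
  let result := scanRuns s
  if !result.isEmpty then
    some (PySem.Str.join "," (result.map PySem.Int.toStr))
  else
    none

-- ===== PRECONDITION & SPEC =====
-- Pre_ excludes exactly the inputs with no element of multiplicity 1, on which A
-- returns the bare boolean False — not a value of the declared return type
-- Optional[str]; B returns False there too.
def Pre_find_unique_elements (nums : List Int) : Prop := ∃ x ∈ nums, nums.count x = 1
instance (nums : List Int) : Decidable (Pre_find_unique_elements nums) := by unfold Pre_find_unique_elements; infer_instance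
def pvWitness_find_unique_elements : List Int := [1]

def Spec_find_unique_elements (nums : List Int) (out : Option String) : Prop := out = find_unique_elements_alt nums
instance (nums : List Int) (out : Option String) : Decidable (Spec_find_unique_elements nums out) := by unfold Spec_find_unique_elements; infer_instance

-- ===== CLAIM (what is proved, stated in full; the proofs are below) =====
def Claim_equal_find_unique_elements : Prop := ∀ (nums : List Int), Dom_find_unique_elements nums → Pre_find_unique_elements nums → Spec_find_unique_elements nums (find_unique_elements nums)

-- ===== LEMMAS AND PROOFS =====

-- A's counting loop is exactly Counter(nums)
lemma countLoop_eq_counter (nums : List Int) :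
    nums.foldl (fun d num =>
      if d.contains num then d.insert num (d.getD num 0 + 1) else d.insert num 1)
      PySem.Dict.empty = PySem.Dict.counter nums := by
  rw [← PySem.Dict.foldl_insert_getD_add_one_eq_counter]
  apply PySem.List.foldl_congr_mem
  intro d num _
  by_cases h : d.contains num
  · simp [h]
  · have h0 : d.getD num 0 = 0 := by
      rw [PySem.Dict.contains_eq_isSome_get?] at h
      simp [PySem.Dict.getD]
      cases hg : d.get? num <;> simp [hg] at h ⊢
    simp [h, h0]

-- A's unique_elements list: the first occurrences with multiplicity 1
lemma uniqueA_eq (nums : List Int) :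
    (PySem.Dict.counter nums).items.foldl
      (fun acc p => if p.2 == 1 then acc ++ [p.1] else acc) []
    = (PySem.Set.ofList nums).filter (fun k => (nums.count k : Int) == 1) := by
  rw [PySem.List.foldl_append_if (p := fun p => p.2 == 1) (f := Prod.fst)]
  rw [PySem.Dict.items_counter]
  rw [List.filter_map, List.map_map]
  simp [Function.comp_def]

lemma scanRuns_nil : scanRuns [] = [] := by simp [scanRuns]
lemma scanRuns_cons (x : Int) (t : List Int) :
    scanRuns (x :: t) =
      if (t.takeWhile (fun y => y == x)).isEmpty then
        x :: scanRuns (t.dropWhile (fun y => y == x))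
      else scanRuns (t.dropWhile (fun y => y == x)) := by
  rw [scanRuns]
lemma scanRuns_sublist (l : List Int) : (scanRuns l).Sublist l := by
  induction l using scanRuns.induct with
  | case1 => simp [scanRuns_nil]
  | case2 x t run rest hrun ih =>
    rw [scanRuns_cons]
    simp only [run] at hrun
    rw [if_pos hrun]
    exact List.Sublist.cons₂ x (ih.trans (List.dropWhile_sublist _))
  | case3 x t run rest hrun ih =>
    rw [scanRuns_cons]
    simp only [run] at hrun
    rw [if_neg hrun]
    exact (ih.trans (List.dropWhile_sublist _)).trans (List.sublist_cons_self x t)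

lemma dropWhile_not_mem (x : Int) (t : List Int) (h : (x :: t).Pairwise (· ≤ ·)) :
    x ∉ t.dropWhile (fun y => y == x) := by
  rw [List.pairwise_cons] at h
  intro hx
  cases hdw : t.dropWhile (fun y => y == x) with
  | nil => simp [hdw] at hx
  | cons d0 dtl =>
    have hd0 : ¬ (d0 == x) = true := by
      have h' := List.head_dropWhile_not (p := fun y => y == x) (l := t) (by simp [hdw])
      simp only [hdw, List.head_cons] at h'
      simpa using h'
    have hd0t : d0 ∈ t := (List.dropWhile_sublist _).mem (by rw [hdw]; exact List.mem_cons_self ..)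
    have hxd0 : x ≤ d0 := h.1 d0 hd0t
    have hlt : x < d0 := lt_of_le_of_ne hxd0 (fun hh => hd0 (by simp [hh.symm]))
    rw [hdw] at hx
    rcases List.mem_cons.mp hx with rfl | hx'
    · simp at hd0
    · have hpw : (d0 :: dtl).Pairwise (· ≤ ·) := by
        have := (h.2).sublist (List.dropWhile_sublist (p := fun y => y == x) (l := t))
        rwa [hdw] at this
      have : d0 ≤ x := (List.pairwise_cons.mp hpw).1 x hx'
      omega

lemma count_head_sorted (x : Int) (t : List Int) (h : (x :: t).Pairwise (· ≤ ·)) :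
    (x :: t).count x = 1 + (t.takeWhile (fun y => y == x)).length := by
  have hsplit : t = t.takeWhile (fun y => y == x) ++ t.dropWhile (fun y => y == x) :=
    (List.takeWhile_append_dropWhile (p := fun y => y == x) (l := t)).symm
  rw [List.count_cons_self]
  conv_lhs => rw [hsplit]
  rw [List.count_append]
  have h1 : (t.takeWhile (fun y => y == x)).count x = (t.takeWhile (fun y => y == x)).length := by
    apply List.count_eq_length.mpr
    intro y hy
    exact (by simpa using List.mem_takeWhile_imp hy : y = x).symm
  have h2 : (t.dropWhile (fun y => y == x)).count x = 0 :=
    List.count_eq_zero.mpr (dropWhile_not_mem x t h)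
  omega

lemma count_ne_sorted (x y : Int) (t : List Int) (hne : y ≠ x) :
    (x :: t).count y = (t.dropWhile (fun y => y == x)).count y := by
  have hsplit : t = t.takeWhile (fun y => y == x) ++ t.dropWhile (fun y => y == x) :=
    (List.takeWhile_append_dropWhile (p := fun y => y == x) (l := t)).symm
  have h1 : (t.takeWhile (fun y => y == x)).count y = 0 := by
    apply List.count_eq_zero.mpr
    intro hy
    exact hne (by simpa using List.mem_takeWhile_imp hy)
  have h2 : t.count y = (t.dropWhile (fun y => y == x)).count y := by
    conv_lhs => rw [hsplit]
    rw [List.count_append, h1]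
    omega
  simp [Ne.symm hne, h2]

lemma pairwise_dropWhile (x : Int) (t : List Int) (h : (x :: t).Pairwise (· ≤ ·)) :
    (t.dropWhile (fun y => y == x)).Pairwise (· ≤ ·) :=
  ((List.pairwise_cons.mp h).2).sublist (List.dropWhile_sublist _)

lemma scanRuns_mem (l : List Int) : l.Pairwise (· ≤ ·) → ∀ y : Int,
    (y ∈ scanRuns l ↔ y ∈ l ∧ l.count y = 1) := by
  induction l using scanRuns.induct with
  | case1 => simp [scanRuns_nil]
  | case2 x t run rest hrun ih =>
    intro h y
    simp only [run] at hrun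
    simp only [rest] at ih
    rw [scanRuns_cons, if_pos hrun]
    have hteq : t.dropWhile (fun y => y == x) = t := by
      conv_rhs => rw [← List.takeWhile_append_dropWhile (p := fun y => y == x) (l := t)]
      rw [List.isEmpty_iff.mp hrun]
      simp
    rw [hteq]
    by_cases hy : y = x
    · rw [hy]
      have hc : (x :: t).count x = 1 := by
        rw [count_head_sorted x t h, List.isEmpty_iff.mp hrun]
        simp
      simp [hc]
    · have hcnt : (x :: t).count y = t.count y := by
        simp [Ne.symm hy]
      have hp : t.Pairwise (· ≤ ·) := (List.pairwise_cons.mp h).2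
      simp only [List.mem_cons, hy, false_or, hcnt]
      rw [hteq] at ih
      exact ih hp y
  | case3 x t run rest hrun ih =>
    intro h y
    simp only [run] at hrun
    simp only [rest] at ih
    rw [scanRuns_cons, if_neg hrun]
    have hdw := pairwise_dropWhile x t h
    have hxdw := dropWhile_not_mem x t h
    rw [ih hdw y]
    by_cases hy : y = x
    · rw [hy]
      have hc : (x :: t).count x = 1 + (t.takeWhile (fun y => y == x)).length :=
        count_head_sorted x t h
      have hlen : (t.takeWhile (fun y => y == x)).length ≠ 0 := by
        simpa [List.isEmpty_iff, List.length_eq_zero_iff] using hrun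
      constructor
      · intro hmem; exact absurd hmem.1 hxdw
      · rintro ⟨-, hcc⟩; omega
    · have hcnt := count_ne_sorted x y t hy
      have hmemiff : y ∈ x :: t ↔ y ∈ t.dropWhile (fun y => y == x) := by
        constructor
        · intro hm
          rcases List.mem_cons.mp hm with rfl | hm'
          · exact absurd rfl hy
          · rw [← List.takeWhile_append_dropWhile (p := fun y => y == x) (l := t)] at hm'
            rcases List.mem_append.mp hm' with h1 | h2
            · exact absurd (by simpa using List.mem_takeWhile_imp h1) hy
            · exact h2
        · intro hm
          exact List.mem_cons_of_mem x ((List.dropWhile_sublist _).mem hm)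
      rw [hcnt, hmemiff]

lemma scanRuns_nodup (l : List Int) : l.Pairwise (· ≤ ·) → (scanRuns l).Nodup := by
  induction l using scanRuns.induct with
  | case1 => simp [scanRuns_nil]
  | case2 x t run rest hrun ih =>
    intro h
    simp only [run] at hrun
    simp only [rest] at ih
    rw [scanRuns_cons, if_pos hrun]
    have hdw := pairwise_dropWhile x t h
    have hxdw := dropWhile_not_mem x t h
    exact List.nodup_cons.mpr ⟨fun hm => hxdw ((scanRuns_sublist _).mem hm), ih hdw⟩
  | case3 x t run rest hrun ih =>
    intro h
    simp only [run] at hrun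
    simp only [rest] at ih
    rw [scanRuns_cons, if_neg hrun]
    exact ih (pairwise_dropWhile x t h)

-- the two result lists coincide
lemma lists_eq (nums : List Int) :
    PySem.List.sorted
      ((PySem.Set.ofList nums).filter (fun k => (nums.count k : Int) == 1))
      (fun x => x) false
    = scanRuns (PySem.List.sorted nums (fun x => x) false) := by
  have hps : (PySem.List.sorted nums (fun x => x) false).Pairwise (· ≤ ·) := by
    simpa using PySem.List.sorted_pairwise (xs := nums) (key := fun x => x)
  apply PySem.List.sorted_id_eq_of_perm_of_pairwise
  · -- Perm: both Nodup and same membership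
    apply (List.perm_ext_iff_of_nodup (scanRuns_nodup _ hps) _).mpr
    · intro y
      rw [scanRuns_mem _ hps y]
      rw [PySem.List.mem_sorted, (PySem.List.sorted_perm nums (fun x => x) false).count_eq]
      simp [PySem.Set.mem_ofList]
    · exact (PySem.Set.nodup_ofList nums).filter _
  · exact hps.sublist (scanRuns_sublist _)

-- ===== VERDICT (by name: the statement is the Claim_ definition above) =====
theorem find_unique_elements_spec : Claim_equal_find_unique_elements := by
  intro nums _ _
  unfold Spec_find_unique_elements find_unique_elements find_unique_elements_alt
  simp only [countLoop_eq_counter, uniqueA_eq]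
  have hE : ((PySem.Set.ofList nums).filter (fun k => (nums.count k : Int) == 1)).isEmpty
      = (scanRuns (PySem.List.sorted nums (fun x => x) false)).isEmpty := by
    rw [Bool.eq_iff_iff]
    simp only [List.isEmpty_iff]
    rw [← lists_eq nums, PySem.List.sorted_eq_nil_iff]
  rw [hE, lists_eq nums]
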